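-- pv_equiv track=rewrite | github.com/soleksy/Pyper | main.py | str_product
-- ===== SOURCE A (Python) =====
-- def str_product(string):
--     result = 1
--     num_string = ""
--
--     for idx, elem in enumerate(string):
--         if elem != " ":
--             num_string += elem
--
--             if idx+1 == len(string):
--                 result = int(num_string) * result
--
--         elif num_string != "":
--             result = int(num_string) * result
--             num_string = ""
--
--     return result
-- ===== SOURCE B (Python) =====
-- def str_product(string):
--     result = 1
--     for token in string.split(" "):
--         if token != "":
--             result = result * int(token)
--     return result
-- ===== Notes on version B (the rewrite author's own statement) =====
-- stated objective: simpler
-- what changed: B splits the string on spaces and folds multiplication over the non-empty tokens, replacing A's character-by-character digit accumulation with its end-of-string boundary check.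
import Mathlib
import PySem

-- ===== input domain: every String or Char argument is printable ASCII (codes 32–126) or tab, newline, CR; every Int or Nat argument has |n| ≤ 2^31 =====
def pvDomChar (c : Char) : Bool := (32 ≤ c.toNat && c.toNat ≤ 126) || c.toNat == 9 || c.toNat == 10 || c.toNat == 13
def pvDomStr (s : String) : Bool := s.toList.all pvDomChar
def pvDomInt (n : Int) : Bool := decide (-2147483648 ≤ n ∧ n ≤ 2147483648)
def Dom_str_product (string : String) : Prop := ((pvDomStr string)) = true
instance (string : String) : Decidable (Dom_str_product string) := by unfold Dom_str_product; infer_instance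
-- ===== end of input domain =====

-- B splits the string on spaces and folds multiplication over the non-empty tokens,
-- replacing A's character-by-character accumulation with its end-of-string boundary check (objective: simpler).

-- ===== PORT A =====
-- A-side helper: the body of A's for-loop (state = (result, num_string), item = (idx, elem)).
def aStep (n : Int) (st : Int × List Char) (p : Int × Char) : Int × List Char :=
  if p.2 ≠ ' ' then
    -- num_string += elem
    if p.1 + 1 = n then ((PySem.Int.ofChars? (st.2 ++ [p.2])).getD 0 * st.1, st.2 ++ [p.2])
    else (st.1, st.2 ++ [p.2])
  else if st.2 ≠ [] then ((PySem.Int.ofChars? st.2).getD 0 * st.1, ([] : List Char))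
  else (st.1, st.2)

def str_product (string : String) : Int :=
  ((PySem.List.enumerate string.toList 0).foldl
    (aStep (PySem.Str.len string)) ((1 : Int), ([] : List Char))).1

-- ===== PORT B =====
def str_product_alt (string : String) : Int :=
  ((PySem.Str.split? string " ").getD []).foldl
    (fun result token =>
      if token ≠ "" then result * (PySem.Int.ofStr? token).getD 0 else result) 1

-- ===== PRECONDITION & SPEC =====
-- Pre_ excludes exactly the inputs where Python's int() raises ValueError in A:
-- some space-delimited non-empty token is not a valid integer literal.
def Pre_str_product (string : String) : Prop :=
  ∀ t ∈ PySem.Chars.splitOn string.toList [' '], t ≠ [] → (PySem.Int.ofChars? t).isSome = true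
instance (string : String) : Decidable (Pre_str_product string) := by
  unfold Pre_str_product; infer_instance

def pvWitness_str_product : String := " 2  -3 "

def Spec_str_product (string : String) (out : Int) : Prop := out = str_product_alt string
instance (string : String) (out : Int) : Decidable (Spec_str_product string out) := by
  unfold Spec_str_product; infer_instance

-- ===== CLAIM (what is proved, stated in full; the proofs are below) =====
def Claim_equal_str_product : Prop :=
  ∀ (string : String), Dom_str_product string → Pre_str_product string →
    Spec_str_product string (str_product string)

-- ===== LEMMAS AND PROOFS =====
-- Proof-side model of s.split(" ") on char lists.
def mySplit : List Char → List (List Char)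
  | [] => [[]]
  | c :: cs => if c = ' ' then [] :: mySplit cs else (mySplit cs).modifyHead (c :: ·)

-- Proof-side model of A's loop with the end-of-string flush pulled out of the loop.
def aRun : List Char → Int → List Char → Int
  | [], r, num => if num ≠ [] then (PySem.Int.ofChars? num).getD 0 * r else r
  | c :: cs, r, num =>
    if c ≠ ' ' then aRun cs r (num ++ [c])
    else aRun cs (if num ≠ [] then (PySem.Int.ofChars? num).getD 0 * r else r) []

-- B's loop body on char lists.
def bStep (r : Int) (t : List Char) : Int :=
  if t ≠ [] then r * (PySem.Int.ofChars? t).getD 0 else r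

lemma mySplit_exists (cs : List Char) : ∃ h t, mySplit cs = h :: t := by
  induction cs with
  | nil => exact ⟨[], [], rfl⟩
  | cons c cs ih =>
    obtain ⟨h, t, ht⟩ := ih
    by_cases hc : c = ' '
    · exact ⟨[], mySplit cs, by simp [mySplit, hc]⟩
    · exact ⟨c :: h, t, by simp [mySplit, hc, ht]⟩

lemma splitOn_go_space (fuel : Nat) :
    ∀ (l cur : List Char) (acc : List (List Char)), l.length ≤ fuel →
      PySem.Chars.splitOn.go [' '] fuel l cur acc
        = acc.reverse ++ (mySplit l).modifyHead (fun t => cur.reverse ++ t) := by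
  induction fuel with
  | zero =>
    intro l cur acc h
    have hl : l = [] := by cases l <;> simp_all
    subst hl
    simp [PySem.Chars.splitOn.go, mySplit]
  | succ fuel ih =>
    intro l cur acc h
    cases l with
    | nil => simp [PySem.Chars.splitOn.go, mySplit]
    | cons c rest =>
      by_cases hc : c = ' '
      · subst hc
        have : PySem.Chars.splitOn.go [' '] (fuel + 1) (' ' :: rest) cur acc
            = PySem.Chars.splitOn.go [' '] fuel rest [] (cur.reverse :: acc) := by
          simp [PySem.Chars.splitOn.go, List.isPrefixOf]
        rw [this, ih rest [] (cur.reverse :: acc) (by simpa using h)]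
        obtain ⟨hh, tt, htt⟩ := mySplit_exists rest
        simp [mySplit, htt, List.modifyHead]
      · have : PySem.Chars.splitOn.go [' '] (fuel + 1) (c :: rest) cur acc
            = PySem.Chars.splitOn.go [' '] fuel rest (c :: cur) acc := by
          simp [PySem.Chars.splitOn.go, List.isPrefixOf, Ne.symm hc]
        rw [this, ih rest (c :: cur) acc (by simpa using h)]
        obtain ⟨hh, tt, htt⟩ := mySplit_exists rest
        simp [mySplit, htt, hc, List.modifyHead]

lemma splitOn_space (cs : List Char) : PySem.Chars.splitOn cs [' '] = mySplit cs := by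
  unfold PySem.Chars.splitOn
  rw [splitOn_go_space (cs.length + 1) cs [] [] (by omega)]
  obtain ⟨hh, tt, htt⟩ := mySplit_exists cs
  simp [htt, List.modifyHead]

lemma enumerate_foldA (n : Int) :
    ∀ (cs : List Char) (c : Char) (k r : Int) (num : List Char),
      k + 1 + (cs.length : Int) = n →
      ((PySem.List.enumerate (c :: cs) k).foldl (aStep n) (r, num)).1 = aRun (c :: cs) r num := by
  intro cs
  induction cs with
  | nil =>
    intro c k r num h
    simp only [PySem.List.enumerate_cons, PySem.List.enumerate_nil, List.foldl_cons, List.foldl_nil]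
    by_cases hc : c = ' '
    · subst hc
      simp only [List.length_nil, Int.natCast_zero, add_zero] at h
      simp only [aStep, aRun]
      by_cases hn : num = [] <;> simp [hn]
    · simp only [List.length_nil, Int.natCast_zero, add_zero] at h
      simp [aStep, aRun, hc, h]
  | cons c' cs' ih =>
    intro c k r num h
    have h' : (k + 1) + 1 + (cs'.length : Int) = n := by
      simp only [List.length_cons] at h; push_cast at h ⊢; omega
    have hk : ¬ (k + 1 = n) := by push_cast at h'; omega
    rw [PySem.List.enumerate_cons, List.foldl_cons]
    by_cases hc : c = ' '
    · subst hc
      by_cases hn : num = []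
      · subst hn
        rw [show aStep n (r, ([] : List Char)) (k, ' ') = (r, []) from by simp [aStep]]
        rw [ih c' (k + 1) r [] h']
        simp [aRun]
      · rw [show aStep n (r, num) (k, ' ')
            = ((PySem.Int.ofChars? num).getD 0 * r, ([] : List Char)) from by simp [aStep, hn]]
        rw [ih c' (k + 1) _ [] h']
        simp [aRun, hn]
    · rw [show aStep n (r, num) (k, c) = (r, num ++ [c]) from by simp [aStep, hk, hc]]
      rw [ih c' (k + 1) r (num ++ [c]) h']
      simp [aRun, hc]

lemma aRun_eq_bfold :
    ∀ (cs : List Char) (r : Int) (num : List Char),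
      aRun cs r num = ((mySplit cs).modifyHead (fun t => num ++ t)).foldl bStep r := by
  intro cs
  induction cs with
  | nil =>
    intro r num
    by_cases hn : num = [] <;> simp [aRun, mySplit, bStep, hn, List.modifyHead, mul_comm]
  | cons c cs ih =>
    intro r num
    by_cases hc : c = ' '
    · subst hc
      simp only [aRun, ne_eq, not_true_eq_false, if_false, mySplit]
      rw [ih _ []]
      obtain ⟨hh, tt, htt⟩ := mySplit_exists cs
      by_cases hn : num = [] <;> simp [htt, List.modifyHead, bStep, hn, mul_comm]
    · simp only [aRun, ne_eq, hc, not_false_eq_true, if_true, mySplit]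
      rw [ih r (num ++ [c])]
      obtain ⟨hh, tt, htt⟩ := mySplit_exists cs
      simp [htt, List.modifyHead]

lemma str_product_eq (s : String) :
    str_product s = (mySplit s.toList).foldl bStep 1 := by
  unfold str_product
  rw [PySem.Str.len_eq]
  cases hcs : s.toList with
  | nil => simp [PySem.List.enumerate_nil, mySplit, bStep]
  | cons c cs =>
    rw [enumerate_foldA (((c :: cs).length : Int)) cs c 0 1 [] (by push_cast [List.length_cons]; omega)]
    rw [aRun_eq_bfold]
    obtain ⟨hh, tt, htt⟩ := mySplit_exists (c :: cs)
    simp [htt, List.modifyHead]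

lemma foldl_tokens (L : List String) : ∀ (r : Int),
    L.foldl (fun result token =>
      if token ≠ "" then result * (PySem.Int.ofStr? token).getD 0 else result) r
    = (L.map String.toList).foldl bStep r := by
  induction L with
  | nil => intro r; rfl
  | cons t L ih =>
    intro r
    simp only [List.foldl_cons, List.map_cons]
    rw [← ih]
    congr 1
    by_cases ht : t = ""
    · subst ht; simp [bStep]
    · have htl : t.toList ≠ [] := by
        intro hnil
        exact ht (by
          have := congrArg String.ofList hnil
          simpa using this)
      simp [bStep, ht, htl, PySem.Int.ofStr?]

lemma str_product_alt_eq (s : String) :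
    str_product_alt s = (mySplit s.toList).foldl bStep 1 := by
  unfold str_product_alt
  have hsplit : PySem.Chars.split? s.toList " ".toList
      = some (PySem.Chars.splitOn s.toList [' ']) := by
    simp [PySem.Chars.split?]
  have hmap := PySem.Str.split?_map s " "
  rw [hsplit] at hmap
  obtain ⟨L, hL, hLmap⟩ := Option.map_eq_some_iff.mp hmap
  rw [hL]
  simp only [Option.getD_some]
  have : PySem.Chars.splitOn s.toList [' '] = L.map String.toList := hLmap.symm
  rw [splitOn_space] at this
  rw [this, foldl_tokens L 1]

-- ===== VERDICT (by name: the statement is the Claim_ definition above) =====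
theorem str_product_spec : Claim_equal_str_product := by
  intro s _ _
  unfold Spec_str_product
  rw [str_product_eq, str_product_alt_eq]
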